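-- pv_equiv track=rewrite | github.com/david-cermak/mind-lab | scripts/select_blog_candidates.py | _parse_single_item_block
-- ===== SOURCE A (Python) =====
-- from typing import Iterable, List, Tuple, Dict, Any, Optional
--
-- def _parse_bold_field_line(line: str) -> tuple[str, str] | None:
--     """
--     Parse lines like:
--       - **URL**: https://...
--       - **Summary**: ...
--       - **Date**: 2025-01-01T...
--     """
--     if not line.startswith("- **") or "**:" not in line:
--         return None
--     # Split at the first '**:' occurrence
--     prefix, value = line.split("**:", 1)
--     # prefix looks like "- **URL"
--     key = prefix.replace("- **", "").strip()
--     value = value.strip()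
--     if not key:
--         return None
--     return key, value
--
-- def _parse_single_item_block(block: str) -> Dict[str, Any]:
--     lines = block.splitlines()
--     header = lines[0].strip() if lines else ""
--     # Expect header like: "### 123. Some title"
--     item_id: Optional[int] = None
--     title = header
--     if header.startswith("### "):
--         after = header[4:].strip()
--         if ". " in after:
--             maybe_num, rest = after.split(". ", 1)
--             try:
--                 item_id = int(maybe_num.strip())
--                 title = rest.strip()
--             except ValueError:
--                 title = after
--         else:
--             title = after
--
--     url: str = ""
--     summary: str = ""
--     date_str: str = ""
--     for line in lines[1:]:
--         parsed = _parse_bold_field_line(line.strip())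
--         if not parsed:
--             continue
--         key, value = parsed
--         k = key.lower()
--         if k == "url":
--             url = value
--         elif k == "summary":
--             summary = value
--         elif k == "date":
--             date_str = value
--
--     return {
--         "item_id": item_id,
--         "title": title,
--         "url": url,
--         "summary": summary,
--         "date": date_str,
--         "raw": block,
--     }
-- ===== SOURCE B (Python) =====
-- from typing import Dict, Any, Optional, List
--
-- def _parse_bold_field_line(line: str) -> "tuple[str, str] | None":
--     if not line.startswith("- **") or "**:" not in line:
--         return None
--     prefix, value = line.split("**:", 1)
--     key = prefix.replace("- **", "").strip()
--     value = value.strip()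
--     if not key:
--         return None
--     return key, value
--
-- def _last_field_value(lines: List[str], key: str) -> str:
--     # search back-to-front, stop at the first (i.e. last-in-file) occurrence of the field
--     for line in reversed(lines):
--         parsed = _parse_bold_field_line(line.strip())
--         if parsed is not None and parsed[0].lower() == key:
--             return parsed[1]
--     return ""
--
-- def _parse_single_item_block(block: str) -> Dict[str, Any]:
--     lines = block.splitlines()
--     header = lines[0].strip() if lines else ""
--     item_id: Optional[int] = None
--     title = header
--     if header.startswith("### "):
--         after = header[4:].strip()
--         if ". " in after:
--             maybe_num, rest = after.split(". ", 1)
--             try: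
--                 item_id = int(maybe_num.strip())
--                 title = rest.strip()
--             except ValueError:
--                 title = after
--         else:
--             title = after
--
--     body = lines[1:]
--     return {
--         "item_id": item_id,
--         "title": title,
--         "url": _last_field_value(body, "url"),
--         "summary": _last_field_value(body, "summary"),
--         "date": _last_field_value(body, "date"),
--         "raw": block,
--     }
-- ===== Notes on version B (the rewrite author's own statement) =====
-- stated objective: alternative
-- what changed: Instead of A's single forward pass threading three mutable accumulators through an if/elif ladder (last assignment wins), B does three independent backward searches over the body lines, each returning early at the first match from the end (which is exactly the last occurrence) or an empty string if none; it trades one stateful pass for stateless per-key reversed scans.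
import Mathlib
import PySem

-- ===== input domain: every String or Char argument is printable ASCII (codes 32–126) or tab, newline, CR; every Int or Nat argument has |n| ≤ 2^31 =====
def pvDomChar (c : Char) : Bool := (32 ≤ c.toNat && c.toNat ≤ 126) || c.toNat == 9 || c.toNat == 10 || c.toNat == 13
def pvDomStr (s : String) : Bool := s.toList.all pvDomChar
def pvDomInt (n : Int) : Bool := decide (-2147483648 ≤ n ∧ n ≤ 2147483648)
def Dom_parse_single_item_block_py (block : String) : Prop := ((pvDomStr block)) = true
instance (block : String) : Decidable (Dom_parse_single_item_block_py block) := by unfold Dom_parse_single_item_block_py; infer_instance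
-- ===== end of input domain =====

-- B replaces A's single forward pass with three mutable accumulators by three independent
-- backward searches of the body, each returning early at the last occurrence of its field.

-- ===== PORT A =====
-- shared helper: literal port of _parse_bold_field_line (same code in Source A and Source B)
def pvParseBold (line : String) : Option (String × String) :=
  if !(PySem.Str.startswith line "- **") || !(PySem.Str.isIn "**:" line) then none
  else
    match PySem.Str.splitMax? line "**:" 1 with
    | some (pre :: value :: _) =>
      let key := PySem.Str.strip (PySem.Str.replace pre "- **" "")
      let value := PySem.Str.strip value
      if key = "" then none else some (key, value)
    | _ => none  -- unreachable: "**:" ∈ line, so the split has ≥ 2 pieces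

-- literal port of the shared header parsing (identical code in Source A and Source B)
def pvHeader (lines : List String) : Option Int × String :=
  let header := match lines with | [] => "" | l :: _ => PySem.Str.strip l
  if PySem.Str.startswith header "### " then
    let after := PySem.Str.strip (PySem.Str.slice header (some 4) none)
    if PySem.Str.isIn ". " after then
      match PySem.Str.splitMax? after ". " 1 with
      | some (maybe_num :: rest :: _) =>
        (match PySem.Int.ofStr? (PySem.Str.strip maybe_num) with
         | some n => (some n, PySem.Str.strip rest)   -- int() succeeded
         | none => (none, after))                      -- except ValueError
      | _ => (none, after)  -- unreachable: ". " ∈ after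
    else (none, after)
  else (none, header)

-- A's loop body: three accumulators updated by an if/elif ladder
def pvStepA (st : String × String × String) (line : String) : String × String × String :=
  match pvParseBold (PySem.Str.strip line) with
  | none => st
  | some (key, value) =>
    let k := PySem.Str.lower key
    if k = "url" then (value, st.2.1, st.2.2)
    else if k = "summary" then (st.1, value, st.2.2)
    else if k = "date" then (st.1, st.2.1, value)
    else st

def parse_single_item_block_py (block : String) : List (String × Option String) :=
  let lines := PySem.Str.splitlines block
  let it := pvHeader lines
  let st := lines.tail.foldl pvStepA ("", "", "")
  [("item_id", it.1.map PySem.Int.toStr), ("title", some it.2),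
   ("url", some st.1), ("summary", some st.2.1), ("date", some st.2.2),
   ("raw", some block)]

-- ===== PORT B =====
-- B's helper _last_field_value: scan the (already reversed) line list front-to-back,
-- return at the first line whose parsed field key (lowered) equals `key`, else ""
def pvLastField (key : String) : List String → String
  | [] => ""
  | l :: ls =>
    match pvParseBold (PySem.Str.strip l) with
    | some (k, v) => if PySem.Str.lower k = key then v else pvLastField key ls
    | none => pvLastField key ls

def parse_single_item_block_py_alt (block : String) : List (String × Option String) :=
  let lines := PySem.Str.splitlines block
  let it := pvHeader lines
  let body := lines.tail
  [("item_id", it.1.map PySem.Int.toStr), ("title", some it.2),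
   ("url", some (pvLastField "url" body.reverse)),
   ("summary", some (pvLastField "summary" body.reverse)),
   ("date", some (pvLastField "date" body.reverse)),
   ("raw", some block)]

-- ===== PRECONDITION & SPEC =====
def Spec_parse_single_item_block_py (block : String) (out : List (String × Option String)) : Prop := out = parse_single_item_block_py_alt block
instance (block : String) (out : List (String × Option String)) : Decidable (Spec_parse_single_item_block_py block out) := by unfold Spec_parse_single_item_block_py; infer_instance

-- ===== CLAIM (what is proved, stated in full; the proofs are below) =====
def Claim_equal_parse_single_item_block_py : Prop := ∀ (block : String), Dom_parse_single_item_block_py block → Spec_parse_single_item_block_py block (parse_single_item_block_py block)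

-- ===== LEMMAS AND PROOFS =====

-- proof helper: pvLastField with an explicit default for the not-found case
def pvFD (key d : String) : List String → String
  | [] => d
  | l :: ls =>
    match pvParseBold (PySem.Str.strip l) with
    | some (k, v) => if PySem.Str.lower k = key then v else pvFD key d ls
    | none => pvFD key d ls

-- how one trailing line updates the default of a backward search
def pvUpd (key d l : String) : String :=
  match pvParseBold (PySem.Str.strip l) with
  | some (k, v) => if PySem.Str.lower k = key then v else d
  | none => d

theorem pvLastField_eq_FD (key : String) (ls : List String) :
    pvLastField key ls = pvFD key "" ls := by
  induction ls with
  | nil => rfl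
  | cons l ls ih =>
    simp only [pvLastField, pvFD]
    cases pvParseBold (PySem.Str.strip l) with
    | none => exact ih
    | some kv => cases kv with | mk k v => simp [ih]

theorem pvFD_snoc (key d : String) (xs : List String) (l : String) :
    pvFD key d (xs ++ [l]) = pvFD key (pvUpd key d l) xs := by
  induction xs with
  | nil => simp [pvFD, pvUpd]
  | cons x xs ih =>
    simp only [List.cons_append, pvFD]
    cases pvParseBold (PySem.Str.strip x) with
    | none => exact ih
    | some kv => cases kv with | mk k v => simp [ih]

-- loop invariant: A's accumulator triple equals the three backward searches with the
-- accumulator values as defaults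
theorem pvLoop (ls : List String) (u s d : String) :
    ls.foldl pvStepA (u, s, d) =
    (pvFD "url" u ls.reverse, pvFD "summary" s ls.reverse, pvFD "date" d ls.reverse) := by
  induction ls generalizing u s d with
  | nil => rfl
  | cons l ls ih =>
    simp only [List.foldl_cons, List.reverse_cons, pvFD_snoc]
    have hstep : pvStepA (u, s, d) l = (pvUpd "url" u l, pvUpd "summary" s l, pvUpd "date" d l) := by
      simp only [pvStepA, pvUpd]
      cases h : pvParseBold (PySem.Str.strip l) with
      | none => rfl
      | some kv =>
        cases kv with | mk k v =>
        by_cases h1 : PySem.Str.lower k = "url"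
        · simp [h1]
        · by_cases h2 : PySem.Str.lower k = "summary"
          · simp [h2]
          · by_cases h3 : PySem.Str.lower k = "date"
            · simp [h3]
            · simp [h1, h2, h3]
    rw [hstep, ih]

-- ===== VERDICT (by name: the statement is the Claim_ definition above) =====
theorem parse_single_item_block_py_spec : Claim_equal_parse_single_item_block_py := by
  intro block _
  unfold Spec_parse_single_item_block_py parse_single_item_block_py parse_single_item_block_py_alt
  simp only [pvLoop, pvLastField_eq_FD]
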